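-- pv_equiv track=rewrite | github.com/Ekatmil/Efficient-representation-of-k-mers-sets | testStr.py | allKMers
-- ===== SOURCE A (Python) =====
-- def allKMers(st, lst):
--     print ("--CHECKING EXISTENCE OF ALL K_MERS--")
--     #initializing
--     st = st.upper()
--     lst_dict = {}
--     k = len(lst[0])
--     #store all kmers to the dictionary in form kmer:false
--     for kmer in lst:
--         lst_dict[kmer] = False
--
--     #check if part of string is in the dictionary
--     for i in range(len(st) - k + 1):
--         kmer = st[i:i+k]
--         if lst_dict.get(kmer) != None:
--             lst_dict[kmer] = True
--
--     #check if all the keys in dictionary have value of True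
--     checker = all(val == True for val in lst_dict.values())
--
--     #print result
--     if checker:
--         print ("ALL K-MERS ARE IN SUPERSTRING")
--         print ("####################")
--     else:
--         print ("NOT ALL K-MERS ARE IN SUPERSTRING")
--         notFound = set()
--         for key, value in lst_dict.items():
--             if value == False:
--                 notFound.add(key)
--         print ("MISSING: ", *notFound, sep = " ")
--
--     return checker
-- ===== SOURCE B (Python) =====
-- def allKMers(st, lst):
--     print ("--CHECKING EXISTENCE OF ALL K_MERS--")
--     s = st.upper()
--     k = len(lst[0])
--     notFound = {kmer for kmer in lst if len(kmer) != k or kmer not in s}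
--     checker = not notFound
--     if checker:
--         print ("ALL K-MERS ARE IN SUPERSTRING")
--         print ("####################")
--     else:
--         print ("NOT ALL K-MERS ARE IN SUPERSTRING")
--         print ("MISSING: ", *notFound, sep = " ")
--     return checker
-- ===== Notes on version B (the rewrite author's own statement) =====
-- stated objective: alternative
-- what changed: B replaces A's window enumeration entirely: instead of marking a kmer->found dict while sliding over every length-k window of the superstring, B runs one substring search ('kmer in s') plus a length check per target kmer, with no window loop or window set at all; the equivalence claimed is about the return value only (the MISSING print line may list kmers in a different order).
import Mathlib
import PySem

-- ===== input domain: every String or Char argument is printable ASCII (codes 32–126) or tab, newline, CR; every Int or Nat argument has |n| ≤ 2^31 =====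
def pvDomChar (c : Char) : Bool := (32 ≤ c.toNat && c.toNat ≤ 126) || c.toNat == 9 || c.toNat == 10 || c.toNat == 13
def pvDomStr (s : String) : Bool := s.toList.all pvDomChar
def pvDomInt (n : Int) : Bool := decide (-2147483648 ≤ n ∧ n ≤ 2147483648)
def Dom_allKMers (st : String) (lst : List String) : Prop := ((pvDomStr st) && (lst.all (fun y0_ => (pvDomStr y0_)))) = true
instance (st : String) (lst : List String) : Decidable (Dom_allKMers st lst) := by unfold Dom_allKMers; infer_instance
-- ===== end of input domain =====

-- B drops A's sliding-window enumeration and marking dict entirely: it decides each target kmer by one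
-- substring search ('kmer in s') plus a length check; the equivalence claimed is about the RETURN value
-- only (the MISSING print line may list the missing kmers in a different order).

-- ===== PORT A =====
def allKMers (st : String) (lst : List String) : Bool :=
  match PySem.List.pyGet? lst 0 with
  | none => false   -- lst = []: Python raises IndexError at lst[0]; excluded by Pre_
  | some first =>
    let s := PySem.Str.upper st
    let k : Int := PySem.Str.len first
    let d0 : PySem.Dict String Bool :=
      lst.foldl (fun d kmer => d.insert kmer false) PySem.Dict.empty
    let d1 :=
      (PySem.List.pyRange 0 (PySem.Str.len s - k + 1) 1).foldl
        (fun d i =>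
          if (d.get? (PySem.Str.slice s (some i) (some (i + k)))).isSome then
            d.insert (PySem.Str.slice s (some i) (some (i + k))) true
          else d) d0
    d1.values.all (fun v => v == true)

-- ===== PORT B =====
def allKMers_alt (st : String) (lst : List String) : Bool :=
  match PySem.List.pyGet? lst 0 with
  | none => false   -- lst = []: Python raises IndexError at lst[0]; excluded by Pre_
  | some first =>
    let s := PySem.Str.upper st
    let k : Int := PySem.Str.len first
    let notFound : PySem.Set String :=
      PySem.Set.ofList (lst.filter
        (fun kmer => !(PySem.Str.len kmer == k && PySem.Str.isIn kmer s)))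
    notFound.isEmpty

-- ===== PRECONDITION & SPEC =====
-- Pre_ excludes only lst = [], on which the Python A (and B) raises IndexError at lst[0].
def Pre_allKMers (st : String) (lst : List String) : Prop := lst ≠ []
instance (st : String) (lst : List String) : Decidable (Pre_allKMers st lst) := by
  unfold Pre_allKMers; infer_instance

def pvWitness_allKMers : String × List String := ("ACGTAC", ["AC", "GT"])

def Spec_allKMers (st : String) (lst : List String) (out : Bool) : Prop := out = allKMers_alt st lst
instance (st : String) (lst : List String) (out : Bool) : Decidable (Spec_allKMers st lst out) := by unfold Spec_allKMers; infer_instance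

-- ===== CLAIM (what is proved, stated in full; the proofs are below) =====
def Claim_equal_allKMers : Prop := ∀ (st : String) (lst : List String), Dom_allKMers st lst → Pre_allKMers st lst → Spec_allKMers st lst (allKMers st lst)

-- ===== LEMMAS AND PROOFS =====

-- get? of the initialisation dict: every element of l maps to false, others untouched.
theorem pv_get?_init (l : List String) (d : PySem.Dict String Bool) (x : String) :
    ((l.foldl (fun d kmer => d.insert kmer false) d).get? x)
      = if x ∈ l then some false else d.get? x := by
  induction l generalizing d with
  | nil => simp
  | cons y l ih =>
    simp only [List.foldl_cons, ih, PySem.Dict.get?_insert, List.mem_cons]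
    by_cases hxl : x ∈ l <;> by_cases hxy : x = y <;> simp [hxl, hxy]

-- keys of the scan fold stay duplicate-free
theorem pv_nodup_scan (win : Int → String) (is : List Int) (d : PySem.Dict String Bool)
    (h : d.keys.Nodup) :
    ((is.foldl (fun d i =>
        if (d.get? (win i)).isSome then d.insert (win i) true else d) d).keys).Nodup := by
  induction is generalizing d with
  | nil => exact h
  | cons i is ih =>
    simp only [List.foldl_cons]
    by_cases hw : (d.get? (win i)).isSome
    · rw [if_pos hw]; exact ih _ (PySem.Dict.nodup_keys_insert _ _ _ h)
    · rw [if_neg hw]; exact ih _ h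

-- the scan loop: get? of the result, for ANY window function over the index list
theorem pv_get?_scan (win : Int → String) (is : List Int) (d : PySem.Dict String Bool)
    (x : String) :
    ((is.foldl (fun d i =>
        if (d.get? (win i)).isSome then d.insert (win i) true else d) d).get? x)
      = (d.get? x).map (fun b => b || decide (x ∈ is.map win)) := by
  induction is generalizing d with
  | nil => cases h : d.get? x <;> simp [h]
  | cons i is ih =>
    simp only [List.foldl_cons]
    by_cases hw : (d.get? (win i)).isSome
    · rw [if_pos hw, ih]
      by_cases hx : x = win i
      · subst hx
        rcases Option.isSome_iff_exists.1 hw with ⟨b, hb⟩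
        simp [PySem.Dict.get?_insert_self, hb]
      · simp [PySem.Dict.get?_insert_of_ne _ _ hx, hx]
    · rw [if_neg hw, ih]
      by_cases hx : x = win i
      · subst hx
        simp only [Option.not_isSome_iff_eq_none] at hw
        simp [hw]
      · simp [hx]

-- A's value characterised: true iff every kmer of lst occurs among the windows
theorem pv_A_true_iff (lst : List String) (win : Int → String) (is : List Int) :
    ((is.foldl (fun d i =>
        if (d.get? (win i)).isSome then d.insert (win i) true else d)
        (lst.foldl (fun d kmer => d.insert kmer false) PySem.Dict.empty)).values.all
        (fun v => v == true)) = true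
      ↔ ∀ x ∈ lst, x ∈ is.map win := by
  set d0 := lst.foldl (fun d kmer => d.insert kmer false) PySem.Dict.empty with hd0
  set d1 := is.foldl (fun d i =>
      if (d.get? (win i)).isSome then d.insert (win i) true else d) d0 with hd1
  have hnodup0 : d0.keys.Nodup := by
    rw [hd0]
    exact PySem.Dict.nodup_keys_foldl_insert lst (fun _ _ => false) _ PySem.Dict.nodup_keys_empty
  have hnodup1 : d1.keys.Nodup := pv_nodup_scan win is d0 hnodup0
  have hget0 : ∀ x, d0.get? x = if x ∈ lst then some false else none := by
    intro x; rw [hd0, pv_get?_init]; simp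
  have hget1 : ∀ x, d1.get? x =
      if x ∈ lst then some (decide (x ∈ is.map win)) else none := by
    intro x
    rw [hd1, pv_get?_scan, hget0]
    by_cases hx : x ∈ lst <;> simp [hx]
  have hvals : (d1.values.all (fun v => v == true)) = d1.items.all (fun p => p.2 == true) := by
    show ((d1.items.map Prod.snd).all _) = _
    rw [List.all_map]; rfl
  rw [hvals, List.all_eq_true]
  constructor
  · intro h x hx
    have hg : d1.get? x = some (decide (x ∈ is.map win)) := by rw [hget1]; simp [hx]
    have hm := PySem.Dict.mem_items_of_get?_eq_some _ hg
    have := h _ hm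
    simpa using this
  · intro h p hp
    have hg : d1.get? p.1 = some p.2 := PySem.Dict.get?_of_mem_items _ hp hnodup1
    rw [hget1] at hg
    by_cases hx : p.1 ∈ lst
    · rw [if_pos hx] at hg
      have := h _ hx
      simp only [Option.some.injEq] at hg
      simp [← hg, this]
    · rw [if_neg hx] at hg; exact absurd hg (by simp)

theorem pv_ofList_eq_nil (l : List String) : PySem.Set.ofList l = [] ↔ l = [] := by
  constructor
  · intro h
    rw [List.eq_nil_iff_forall_not_mem]
    intro x hx
    have := (PySem.Set.mem_ofList l x).2 hx
    rw [h] at this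
    simp at this
  · rintro rfl; rfl

-- B's value characterised: true iff every kmer has length k and is a substring of s
theorem pv_B_true_iff (lst : List String) (s : String) (k : Int) :
    ((PySem.Set.ofList (lst.filter
        (fun kmer => !(PySem.Str.len kmer == k && PySem.Str.isIn kmer s)))).isEmpty) = true
      ↔ ∀ x ∈ lst, PySem.Str.len x = k ∧ x.toList <:+: s.toList := by
  rw [List.isEmpty_iff, pv_ofList_eq_nil, List.filter_eq_nil_iff]
  have hpt : ∀ x : String, (¬ (!(PySem.Str.len x == k && PySem.Str.isIn x s)) = true)
      ↔ (PySem.Str.len x = k ∧ x.toList <:+: s.toList) := by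
    intro x
    simp [← PySem.Str.isIn_iff_infix]
  exact ⟨fun h x hx => (hpt x).1 (h x hx), fun h x hx => (hpt x).2 (h x hx)⟩

-- a kmer is one of the length-k windows of s iff it has length k and is a substring of s
theorem pv_window_iff (s x : String) (k : Nat) :
    (x ∈ (PySem.List.pyRange 0 ((PySem.Str.len s) - (k : Int) + 1) 1).map
        (fun i => PySem.Str.slice s (some i) (some (i + (k : Int)))))
      ↔ (x.toList.length = k ∧ x.toList <:+: s.toList) := by
  rw [List.mem_map]
  constructor
  · rintro ⟨i, hi, heq⟩
    rw [PySem.List.mem_pyRange_one] at hi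
    obtain ⟨h0, hlt⟩ := hi
    obtain ⟨j, rfl⟩ : ∃ j : Nat, i = (j : Int) := ⟨i.toNat, (Int.toNat_of_nonneg h0).symm⟩
    rw [PySem.Str.len_eq] at hlt
    have hjk : j + k ≤ s.toList.length := by omega
    have hx : x.toList = (s.toList.drop j).take k := by
      have := congrArg String.toList heq
      rw [PySem.Str.toList_slice, PySem.Chars.slice_eq_listSlice] at this
      rw [← this]
      have : ((j : Int) + (k : Int)) = ((j + k : Nat) : Int) := by push_cast; ring
      rw [this, PySem.List.slice_natCast]
      congr 1
      omega
    constructor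
    · rw [hx, List.length_take, List.length_drop]; omega
    · rw [hx]
      exact ((List.take_prefix _ _).isInfix).trans (List.drop_suffix _ _).isInfix
  · rintro ⟨hlen, hinf⟩
    have key : ∀ j' : Nat, j' + k ≤ s.toList.length → (s.toList.drop j').take k = x.toList →
        ∃ i ∈ PySem.List.pyRange 0 ((PySem.Str.len s) - (k : Int) + 1) 1,
          PySem.Str.slice s (some i) (some (i + (k : Int))) = x := by
      intro j' hle htake
      refine ⟨(j' : Int), ?_, ?_⟩
      · rw [PySem.List.mem_pyRange_one, PySem.Str.len_eq]
        omega
      · apply String.ext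
        rw [PySem.Str.toList_slice, PySem.Chars.slice_eq_listSlice]
        have hcast : ((j' : Int) + (k : Int)) = ((j' + k : Nat) : Int) := by push_cast; ring
        rw [hcast, PySem.List.slice_natCast]
        rwa [show j' + k - j' = k by omega]
    obtain ⟨j, hpre⟩ := (PySem.Chars.exists_prefix_drop_iff_isIn _ _).2
      ((PySem.Chars.isIn_iff_infix _ _).2 hinf)
    have htake : (s.toList.drop j).take x.toList.length = x.toList :=
      (List.prefix_iff_eq_take.mp hpre).symm
    have hxlen : x.toList.length ≤ s.toList.length - j := by
      have := hpre.length_le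
      simpa using this
    by_cases hj : j + k ≤ s.toList.length
    · refine key j hj ?_
      rw [← hlen]
      exact htake
    · -- the prefix witness lies past the end: then k = 0 and the empty window at 0 works
      have hk0 : k = 0 := by omega
      have hx0 : x.toList = [] := List.length_eq_zero_iff.mp (by omega)
      exact key 0 (by omega) (by simp [hk0, hx0])

-- ===== VERDICT (by name: the statement is the Claim_ definition above) =====
theorem allKMers_spec : Claim_equal_allKMers := by
  intro st lst _ hpre
  unfold Spec_allKMers
  cases lst with
  | nil => exact absurd rfl hpre
  | cons first rest =>
    simp only [allKMers, allKMers_alt, PySem.List.pyGet?_zero_cons]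
    rw [Bool.eq_iff_iff]
    rw [pv_A_true_iff (first :: rest)
        (fun i => PySem.Str.slice (PySem.Str.upper st) (some i) (some (i + PySem.Str.len first)))
        (PySem.List.pyRange 0 (PySem.Str.len (PySem.Str.upper st) - PySem.Str.len first + 1) 1)]
    rw [pv_B_true_iff (first :: rest) (PySem.Str.upper st) (PySem.Str.len first)]
    have hk : PySem.Str.len first = ((first.toList.length : Nat) : Int) := PySem.Str.len_eq first
    constructor
    · intro h x hx
      have hm := h x hx
      rw [hk] at hm
      have := (pv_window_iff (PySem.Str.upper st) x first.toList.length).1 hm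
      refine ⟨?_, this.2⟩
      rw [hk, ← this.1]
      exact PySem.Str.len_eq x
    · intro h x hx
      rcases h x hx with ⟨hlen, hinf⟩
      rw [hk]
      refine (pv_window_iff (PySem.Str.upper st) x first.toList.length).2 ⟨?_, hinf⟩
      rw [hk, PySem.Str.len_eq] at hlen
      exact_mod_cast hlen
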